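-- pv_equiv track=rewrite | github.com/Liebestraum1/problem-solving | Programmers/Level_1/둘만의 암호.py | solution
-- ===== SOURCE A (Python) =====
-- def solution(s, skip, index):
--     answer = ''
--     for alphabet in s:
--         a = ord(alphabet)
--         for _ in range(index):
--             a += 1
--             while r(a) in skip:
--                 a += 1
--         answer += r(a)
--     return answer
--
-- def r(a : int):
--     return chr((a - 97) % 26 + 97)
-- ===== SOURCE B (Python) =====
-- def solution(s, skip, index):
--     if index <= 0:
--         return ''.join(chr((ord(ch) - 97) % 26 + 97) for ch in s)
--
--     def step(c):
--         c = (c + 1) % 26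
--         while chr(97 + c) in skip:
--             c = (c + 1) % 26
--         return c
--
--     out = []
--     for ch in s:
--         start = (ord(ch) - 97) % 26
--         seq = [start]
--         c = start
--         while True:
--             c = step(c)
--             if c in seq:
--                 mu = seq.index(c)
--                 lam = len(seq) - mu
--                 break
--             seq.append(c)
--         k = index if index < len(seq) else mu + (index - mu) % lam
--         out.append(chr(97 + seq[k]))
--     return ''.join(out)
-- ===== Notes on version B (the rewrite author's own statement) =====
-- stated objective: faster
-- what changed: Instead of literally simulating all `index` increment-and-skip steps per character (each scanning skip repeatedly), B detects the cycle of the 26-letter successor map once per character and reduces the step count modulo the cycle length, so the work per character is bounded by a constant independent of index.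
import Mathlib
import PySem

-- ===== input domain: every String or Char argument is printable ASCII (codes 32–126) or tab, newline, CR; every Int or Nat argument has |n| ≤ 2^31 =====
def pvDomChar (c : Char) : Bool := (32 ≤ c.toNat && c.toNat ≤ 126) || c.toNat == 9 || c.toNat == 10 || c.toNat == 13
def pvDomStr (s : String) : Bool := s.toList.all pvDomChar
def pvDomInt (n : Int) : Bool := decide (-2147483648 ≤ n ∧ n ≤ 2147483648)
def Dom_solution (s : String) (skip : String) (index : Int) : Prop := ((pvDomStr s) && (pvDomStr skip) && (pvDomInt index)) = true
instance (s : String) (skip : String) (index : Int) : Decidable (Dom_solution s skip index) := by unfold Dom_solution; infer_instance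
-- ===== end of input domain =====

-- B replaces A's per-character loop of `index` skip-scanning steps by cycle detection on
-- the 26 letter residues plus modular index reduction (objective: faster for large `index`).


-- ===== PORT A =====
-- r(a) = chr((a - 97) % 26 + 97)
def pyr (a : Int) : Char := Char.ofNat ((PySem.Int.mod (a - 97) 26 + 97).toNat)

-- `while r(a) in skip: a += 1`; fuel 26 is enough whenever some letter is not in skip
-- (the Pre_ inputs); `in` on the 1-char needle is PySem.Chars.isIn (exact)
def whileA (skip : List Char) : Nat → Int → Int
  | 0, a => a
  | f+1, a => if PySem.Chars.isIn [pyr a] skip then whileA skip f (a + 1) else a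

-- one body of `for _ in range(index)`: `a += 1` then the while loop
def stepA (skip : List Char) (a : Int) : Int := whileA skip 26 (a + 1)

-- `for _ in range(index)` (range(index) has index.toNat iterations)
def loopA (skip : List Char) : Nat → Int → Int
  | 0, a => a
  | n+1, a => loopA skip n (stepA skip a)

def solution (s : String) (skip : String) (index : Int) : String :=
  String.mk (s.toList.foldl
    (fun acc ch => acc ++ [pyr (loopA skip.toList index.toNat ((ch.toNat : Int)))]) [])

-- ===== PORT B =====
-- (ord(ch) - 97) % 26
def resB (ch : Char) : Nat := (PySem.Int.mod ((ch.toNat : Int) - 97) 26).toNat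

-- `while chr(97 + c) in skip: c = (c + 1) % 26`; fuel 26 as in port A
def stepBGo (skip : List Char) : Nat → Nat → Nat
  | 0, c => c
  | f+1, c => if PySem.Chars.isIn [Char.ofNat (97 + c)] skip then stepBGo skip f ((c + 1) % 26) else c

-- def step(c): c = (c + 1) % 26; while …; return c
def stepB (skip : List Char) (c : Nat) : Nat := stepBGo skip 26 ((c + 1) % 26)

-- the `while True:` cycle-detection loop; fuel 27 (seq holds distinct residues < 26, so the
-- loop always breaks by then); returns (seq, mu, lam)
def detectB (skip : List Char) : Nat → List Nat → Nat → List Nat × Nat × Nat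
  | 0, seq, _ => (seq, 0, 1)
  | f+1, seq, c =>
    let c' := stepB skip c
    if c' ∈ seq then (seq, seq.idxOf c', seq.length - seq.idxOf c')
    else detectB skip f (seq ++ [c']) c'

-- the per-character body of B's main loop (seq[k] is always in range; getD is never its default)
def charB (skip : List Char) (index : Int) (start : Nat) : Char :=
  let r := detectB skip 27 [start] start
  let k : Int := if index < (r.1.length : Int) then index
                 else (r.2.1 : Int) + PySem.Int.mod (index - (r.2.1 : Int)) (r.2.2 : Int)
  Char.ofNat (97 + r.1.getD k.toNat 0)

def solution_alt (s : String) (skip : String) (index : Int) : String :=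
  if index ≤ 0 then
    String.mk (s.toList.map (fun ch => Char.ofNat (resB ch + 97)))
  else
    String.mk (s.toList.foldl (fun acc ch => acc ++ [charB skip.toList index (resB ch)]) [])

-- ===== PRECONDITION & SPEC =====
-- Pre_ excludes exactly the inputs on which Python A never returns (infinite while loop):
-- index ≥ 1, s nonempty, and all 26 lowercase letters occur in skip.
def Pre_solution (s : String) (skip : String) (index : Int) : Prop :=
  index ≤ 0 ∨ s = "" ∨ ∃ c ∈ List.range 26, ¬ PySem.Chars.isIn [Char.ofNat (97 + c)] skip.toList = true

instance (s : String) (skip : String) (index : Int) : Decidable (Pre_solution s skip index) := by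
  unfold Pre_solution; infer_instance

def pvWitness_solution : String × String × Int := ("aukks", "wbqd", 5)

def Spec_solution (s : String) (skip : String) (index : Int) (out : String) : Prop := out = solution_alt s skip index
instance (s : String) (skip : String) (index : Int) (out : String) : Decidable (Spec_solution s skip index out) := by unfold Spec_solution; infer_instance

-- ===== CLAIM (what is proved, stated in full; the proofs are below) =====
def Claim_equal_solution : Prop := ∀ (s : String) (skip : String) (index : Int), Dom_solution s skip index → Pre_solution s skip index → Spec_solution s skip index (solution s skip index)

-- ===== LEMMAS AND PROOFS =====

-- residue of an integer code: the letter index A's r() prints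
def resI (a : Int) : Nat := (PySem.Int.mod (a - 97) 26).toNat

theorem resI_lt (a : Int) : resI a < 26 := by
  unfold resI
  rw [PySem.Int.mod_eq_emod_of_pos (by norm_num)]
  have h := Int.emod_lt_of_pos (a - 97) (b := 26) (by norm_num)
  have h2 := Int.emod_nonneg (a - 97) (b := 26) (by norm_num)
  omega

theorem resI_succ (a : Int) : resI (a + 1) = (resI a + 1) % 26 := by
  unfold resI
  rw [PySem.Int.mod_eq_emod_of_pos (by norm_num), PySem.Int.mod_eq_emod_of_pos (by norm_num)]
  have e : a + 1 - 97 = (a - 97) + 1 := by ring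
  rw [e, Int.add_emod (a - 97) 1 26]
  have h := Int.emod_lt_of_pos (a - 97) (b := 26) (by norm_num)
  have h2 := Int.emod_nonneg (a - 97) (b := 26) (by norm_num)
  set x := (a - 97) % 26 with hx
  have : (1 : Int) % 26 = 1 := by norm_num
  rw [this]
  rcases Nat.lt_or_ge (x.toNat + 1) 26 with hlt | hge
  · rw [Int.emod_eq_of_lt (by omega) (by omega)]
    omega
  · have hx25 : x = 25 := by omega
    rw [hx25]; decide

theorem pyr_eq (a : Int) : pyr a = Char.ofNat (resI a + 97) := by
  unfold pyr resI
  congr 1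
  rw [PySem.Int.mod_eq_emod_of_pos (by norm_num)]
  have h2 := Int.emod_nonneg (a - 97) (b := 26) (by norm_num)
  omega

theorem while_sync (skip : List Char) : ∀ f a, resI (whileA skip f a) = stepBGo skip f (resI a) := by
  intro f
  induction f with
  | zero => intro a; simp [whileA, stepBGo]
  | succ f ih =>
    intro a
    rw [whileA, stepBGo, pyr_eq, Nat.add_comm (resI a) 97]
    by_cases h : PySem.Chars.isIn [Char.ofNat (97 + resI a)] skip = true
    · rw [if_pos h, if_pos h, ih, resI_succ]
    · rw [if_neg h, if_neg h]

theorem step_sync (skip : List Char) (a : Int) : resI (stepA skip a) = stepB skip (resI a) := by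
  rw [stepA, stepB, while_sync, resI_succ]

theorem loop_sync (skip : List Char) : ∀ n a, resI (loopA skip n a) = (stepB skip)^[n] (resI a) := by
  intro n
  induction n with
  | zero => intro a; simp [loopA]
  | succ n ih =>
    intro a
    rw [loopA, ih, step_sync, Function.iterate_succ_apply]

theorem stepBGo_lt (skip : List Char) : ∀ f c, c < 26 → stepBGo skip f c < 26 := by
  intro f
  induction f with
  | zero => intro c h; simpa [stepBGo] using h
  | succ f ih =>
    intro c h
    rw [stepBGo]
    split
    · exact ih _ (Nat.mod_lt _ (by norm_num))
    · exact h

theorem stepB_lt (skip : List Char) (c : Nat) : stepB skip c < 26 := by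
  exact stepBGo_lt skip 26 _ (Nat.mod_lt _ (by norm_num))

theorem iter_lt (skip : List Char) (x : Nat) (hx : x < 26) (i : Nat) : (stepB skip)^[i] x < 26 := by
  cases i with
  | zero => simpa using hx
  | succ i => rw [Function.iterate_succ_apply']; exact stepB_lt skip _

-- a Nodup list of distinct iterates has length ≤ 26
theorem seq_len_le (skip : List Char) (x : Nat) (hx : x < 26) (m : Nat)
    (hnd : ((List.range m).map (fun i => (stepB skip)^[i] x)).Nodup) : m ≤ 26 := by
  set seq := (List.range m).map (fun i => (stepB skip)^[i] x) with hseq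
  have hlen : seq.length = m := by simp [hseq]
  have hsub : seq.toFinset ⊆ Finset.range 26 := by
    intro y hy
    rw [List.mem_toFinset] at hy
    rw [hseq, List.mem_map] at hy
    obtain ⟨i, _, hi⟩ := hy
    rw [Finset.mem_range]
    exact hi ▸ iter_lt skip x hx i
  have hcard : seq.toFinset.card = m := by rw [List.toFinset_card_of_nodup hnd, hlen]
  have := Finset.card_le_card hsub
  simpa [hcard] using this

theorem detect_spec (skip : List Char) (x : Nat) (hx : x < 26) :
    ∀ fuel m, 1 ≤ m → 27 ≤ fuel + m →
    ((List.range m).map (fun i => (stepB skip)^[i] x)).Nodup →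
    ∃ m' mu, detectB skip fuel ((List.range m).map (fun i => (stepB skip)^[i] x)) ((stepB skip)^[m-1] x)
        = ((List.range m').map (fun i => (stepB skip)^[i] x), mu, m' - mu)
      ∧ m ≤ m' ∧ mu < m' ∧ (stepB skip)^[m'] x = (stepB skip)^[mu] x := by
  intro fuel
  induction fuel with
  | zero =>
    intro m hm hfuel hnd
    exact absurd (seq_len_le skip x hx m hnd) (by omega)
  | succ fuel ih =>
    intro m hm hfuel hnd
    have hc' : stepB skip ((stepB skip)^[m-1] x) = (stepB skip)^[m] x := by
      calc stepB skip ((stepB skip)^[m-1] x) = (stepB skip)^[(m-1)+1] x :=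
            (Function.iterate_succ_apply' (stepB skip) (m-1) x).symm
        _ = (stepB skip)^[m] x := by congr 1; omega
    rw [detectB]
    simp only [hc']
    by_cases hmem : (stepB skip)^[m] x ∈ (List.range m).map (fun i => (stepB skip)^[i] x)
    · rw [if_pos hmem]
      refine ⟨m, List.idxOf ((stepB skip)^[m] x) ((List.range m).map (fun i => (stepB skip)^[i] x)),
        by simp, le_refl m, ?_, ?_⟩
      · have := List.idxOf_lt_length_of_mem hmem
        simpa using this
      · have hlt := List.idxOf_lt_length_of_mem hmem
        have hg : ((List.range m).map (fun i => (stepB skip)^[i] x))[List.idxOf ((stepB skip)^[m] x)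
            ((List.range m).map (fun i => (stepB skip)^[i] x))]'hlt = (stepB skip)^[m] x :=
          List.getElem_idxOf hlt
        have hv : ((List.range m).map (fun i => (stepB skip)^[i] x))[List.idxOf ((stepB skip)^[m] x)
            ((List.range m).map (fun i => (stepB skip)^[i] x))]'hlt
            = (stepB skip)^[List.idxOf ((stepB skip)^[m] x)
                ((List.range m).map (fun i => (stepB skip)^[i] x))] x := by
          simp only [List.getElem_map, List.getElem_range]
        exact hg.symm.trans hv
    · rw [if_neg hmem]
      have hext : ((List.range m).map (fun i => (stepB skip)^[i] x)) ++ [(stepB skip)^[m] x]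
          = (List.range (m+1)).map (fun i => (stepB skip)^[i] x) := by
        rw [List.range_succ, List.map_append]; simp
      have hnd' : ((List.range (m+1)).map (fun i => (stepB skip)^[i] x)).Nodup := by
        rw [← hext]
        simp only [List.nodup_append]
        refine ⟨hnd, List.nodup_singleton _, fun y hy z hzmem => ?_⟩
        rw [List.mem_singleton] at hzmem
        subst hzmem
        intro he
        exact hmem (he ▸ hy)
      have hm1 : (stepB skip)^[m] x = (stepB skip)^[(m+1)-1] x := by norm_num
      rw [hext, hm1]
      obtain ⟨m', mu, h1, h2, h3, h4⟩ := ih (m+1) (by omega) (by omega) hnd'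
      exact ⟨m', mu, h1, by omega, h3, h4⟩

theorem periodic (f : Nat → Nat) (x : Nat) (mu lam : Nat) (hl : 1 ≤ lam)
    (hp : f^[mu + lam] x = f^[mu] x) :
    ∀ n, mu ≤ n → f^[n] x = f^[mu + (n - mu) % lam] x := by
  have hshift : ∀ k, mu ≤ k → f^[k + lam] x = f^[k] x := by
    intro k hk
    have e1 : k + lam = (k - mu) + (mu + lam) := by omega
    have e2 : k = (k - mu) + mu := by omega
    rw [e1, Function.iterate_add_apply, hp, ← Function.iterate_add_apply, ← e2]
  intro n
  induction n using Nat.strong_induction_on with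
  | _ n ih =>
    intro hn
    rcases Nat.lt_or_ge n (mu + lam) with hlt | hge
    · have : (n - mu) % lam = n - mu := Nat.mod_eq_of_lt (by omega)
      rw [this]
      congr 1
      omega
    · have h1 : f^[n] x = f^[n - lam] x := by
        have h := hshift (n - lam) (by omega)
        have e : n - lam + lam = n := by omega
        rw [e] at h
        exact h
      rw [h1, ih (n - lam) (by omega) (by omega)]
      congr 2
      have e : n - mu = (n - lam - mu) + lam := by omega
      rw [e, Nat.add_mod_right]

theorem charB_eq (skip : List Char) (index : Int) (h1 : 1 ≤ index) (start : Nat) (hs : start < 26) :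
    charB skip index start = Char.ofNat (97 + (stepB skip)^[index.toNat] start) := by
  set f := stepB skip with hf
  obtain ⟨m', mu, hdet, hm, hmu, hper⟩ := detect_spec skip start hs 27 1 (by omega) (by omega) (by simp)
  have hcall : detectB skip 27 [start] start
      = ((List.range m').map (fun i => f^[i] start), mu, m' - mu) := by
    have e1 : (List.range 1).map (fun i => f^[i] start) = [start] := by simp
    have e2 : f^[1-1] start = start := by simp
    rw [← e1, ← e2]
    exact hdet
  set n := index.toNat with hn
  have hnix : index = (n : Int) := by omega
  have hlam : 1 ≤ m' - mu := by omega
  set lam := m' - mu with hlamdef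
  have hmul : mu + lam = m' := by omega
  have hp' : f^[mu + lam] start = f^[mu] start := by rw [hmul]; exact hper
  have hperiodic := periodic f start mu lam hlam hp'
  unfold charB
  rw [hcall]
  simp only
  have hlen : ((List.range m').map (fun i => f^[i] start)).length = m' := by simp
  rw [hlen]
  by_cases hcase : index < (m' : Int)
  · rw [if_pos hcase]
    have hnm : n < m' := by omega
    have : ((List.range m').map (fun i => f^[i] start)).getD index.toNat 0 = f^[n] start := by
      rw [← hn, List.getD_eq_getElem _ _ (by simpa using hnm)]
      simp
    rw [this]
  · rw [if_neg hcase]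
    have hnm : m' ≤ n := by omega
    have hmod : PySem.Int.mod (index - (mu : Int)) (lam : Int) = (((n - mu) % lam : Nat) : Int) := by
      rw [PySem.Int.mod_eq_emod_of_pos (by exact_mod_cast hlam)]
      rw [hnix]
      have e : (n : Int) - (mu : Int) = ((n - mu : Nat) : Int) := by omega
      rw [e]
      exact_mod_cast (Int.natCast_mod (n - mu) lam).symm
    rw [hmod]
    have hk : ((mu : Int) + (((n - mu) % lam : Nat) : Int)).toNat = mu + (n - mu) % lam := by omega
    rw [hk]
    have hklt : mu + (n - mu) % lam < m' := by
      have := Nat.mod_lt (n - mu) (y := lam) (by omega)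
      omega
    have : ((List.range m').map (fun i => f^[i] start)).getD (mu + (n - mu) % lam) 0
        = f^[mu + (n - mu) % lam] start := by
      rw [List.getD_eq_getElem _ _ (by simpa using hklt)]
      simp
    rw [this, ← hperiodic n (by omega)]

theorem foldl_app {α : Type} (g : α → Char) : ∀ (l : List α) (acc : List Char),
    l.foldl (fun acc ch => acc ++ [g ch]) acc = acc ++ l.map g := by
  intro l
  induction l with
  | nil => intro acc; simp
  | cons x xs ih => intro acc; simp [List.foldl_cons, ih]

-- ===== VERDICT (by name: the statement is the Claim_ definition above) =====
theorem solution_spec : Claim_equal_solution := by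
  intro s skip index _ _
  unfold Spec_solution solution solution_alt
  by_cases hle : index ≤ 0
  · rw [if_pos hle]
    have hn : index.toNat = 0 := by omega
    rw [hn, foldl_app]
    simp only [List.nil_append]
    congr 1
    apply List.map_congr_left
    intro ch _
    rw [loopA, pyr_eq]
    rfl
  · rw [if_neg hle]
    rw [foldl_app, foldl_app]
    congr 1
    apply List.map_congr_left
    intro ch _
    rw [pyr_eq, loop_sync]
    have hres : resI ((ch.toNat : Int)) = resB ch := rfl
    rw [hres, charB_eq skip.toList index (by omega) (resB ch) (resI_lt ((ch.toNat : Int)))]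
    rw [Nat.add_comm]
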